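-- pv_equiv track=rewrite | github.com/sayan98-OG/practice_py_repo | code/songs_to_perform.py | singable
-- ===== SOURCE A (Python) =====
-- def compare(song, low, high):
--     songoctave = song[1]
--     lowoctave = low[1]
--     highoctave = high[1]
--     sp = song[0]
--     lp = low[0]
--     hp = high[0]
--     hy = 'CDEFGAB'
--     s = hy.index(sp)
--     l = hy.index(lp)
--     h = hy.index(hp)
--     if songoctave<highoctave and songoctave>lowoctave:
--         return 1
--     elif songoctave<lowoctave:
--         return 0
--     elif songoctave>highoctave:
--         return 0
--     elif songoctave==highoctave==lowoctave:
--         if s>=l and s<=h: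
--             return 1
--         else :
--             return 0
--     elif songoctave == highoctave:
--         if s<=h:
--             return 1
--         else :
--             return 0
--     elif songoctave == lowoctave:
--         if s>=l:
--             return 1
--         else:
--             return 0
--
-- def singable(l:list, low, high):
--     out = []
--     for i in l:
--         out.append(compare(i, low, high))
--
--     if 0 in out:
--         return False
--     else :
--         return True
-- ===== SOURCE B (Python) =====
-- def singable(l: list, low, high):
--     # Reduce the song list to its extremes: map each note to a single integer
--     # key (octave * 7 + pitch index), then the whole list is singable iff
--     # low_key <= min(keys) and max(keys) <= high_key.
--     if not l:
--         return True
--     hy = 'CDEFGAB'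
--     def key(n):
--         return n[1] * 7 + hy.index(n[0])
--     ks = [key(s) for s in l]
--     return key(low) <= min(ks) and max(ks) <= key(high)
-- ===== Notes on version B (the rewrite author's own statement) =====
-- stated objective: alternative
-- what changed: Instead of testing every song against the range with a 6-branch octave/pitch decision tree and scanning the 0/1 result list for 0, B linearises each note to one integer key (octave*7 + pitch index), reduces the list to its min and max key, and compares only those two extremes against the low/high keys.
import Mathlib
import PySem

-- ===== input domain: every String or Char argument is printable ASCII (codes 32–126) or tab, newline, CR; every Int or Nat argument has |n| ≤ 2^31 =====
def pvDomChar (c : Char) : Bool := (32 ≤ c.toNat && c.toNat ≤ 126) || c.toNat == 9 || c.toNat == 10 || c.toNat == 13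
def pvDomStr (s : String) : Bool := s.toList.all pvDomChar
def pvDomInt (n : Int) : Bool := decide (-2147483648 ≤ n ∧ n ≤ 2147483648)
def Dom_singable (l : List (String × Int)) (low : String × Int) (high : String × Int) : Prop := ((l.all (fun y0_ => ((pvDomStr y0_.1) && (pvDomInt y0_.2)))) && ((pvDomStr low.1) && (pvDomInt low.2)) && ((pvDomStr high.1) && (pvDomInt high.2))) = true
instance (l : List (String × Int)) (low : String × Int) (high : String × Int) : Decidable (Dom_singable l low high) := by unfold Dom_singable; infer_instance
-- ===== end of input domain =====

-- B replaces A's per-song 6-branch decision tree and 0/1 out-list with a reduction: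
-- each note becomes one integer key (octave*7 + pitch index) and only the list's
-- min and max key are compared against the low/high keys; objective: alternative.


-- ===== PORT A =====
-- 'CDEFGAB'.index(p): none = ValueError (substring not found)
def pvIdx (p : String) : Option Int :=
  let i := PySem.Str.find "CDEFGAB" p
  if i = -1 then none else some i

def pvCompare (song low high : String × Int) : Option Int :=
  let songoctave := song.2
  let lowoctave := low.2
  let highoctave := high.2
  match pvIdx song.1, pvIdx low.1, pvIdx high.1 with
  | some s, some l, some h =>
      some (if songoctave < highoctave ∧ songoctave > lowoctave then 1
       else if songoctave < lowoctave then 0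
       else if songoctave > highoctave then 0
       else if songoctave = highoctave ∧ highoctave = lowoctave then
         (if s ≥ l ∧ s ≤ h then 1 else 0)
       else if songoctave = highoctave then (if s ≤ h then 1 else 0)
       else if songoctave = lowoctave then (if s ≥ l then 1 else 0)
       else 0)  -- unreachable for Int octaves (Python would fall off and return None)
  | _, _, _ => none

def singable (l : List (String × Int)) (low : String × Int) (high : String × Int) : Bool :=
  let out := l.foldl (fun acc i =>
    match acc, pvCompare i low high with
    | some o, some c => some (o ++ [c])
    | _, _ => none) (some [])
  match out with
  | some o => if (0 : Int) ∈ o then false else true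
  | none => false  -- Python raises ValueError here; excluded by Pre_singable

-- ===== PORT B =====
-- key(n) = n[1] * 7 + 'CDEFGAB'.index(n[0]); none = ValueError
def pvKey? (n : String × Int) : Option Int :=
  match pvIdx n.1 with
  | some i => some (n.2 * 7 + i)
  | none => none

def singable_alt (l : List (String × Int)) (low : String × Int) (high : String × Int) : Bool :=
  if l = [] then true
  else
    match l.mapM pvKey?, pvKey? low, pvKey? high with
    | some ks, some kl, some kh =>
        match PySem.List.min? ks (fun x : Int => x), PySem.List.max? ks (fun x : Int => x) with
        | some mn, some mx => decide (kl ≤ mn) && decide (mx ≤ kh)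
        | _, _ => false  -- unreachable: ks is nonempty
    | _, _, _ => false  -- Python raises ValueError here; excluded by Pre_singable

-- ===== PRECONDITION & SPEC =====
-- Pre_ excludes exactly the inputs on which A raises ValueError: a nonempty song list
-- together with some pitch string (song, low or high) that is not a substring of 'CDEFGAB'.
def Pre_singable (l : List (String × Int)) (low : String × Int) (high : String × Int) : Prop :=
  l = [] ∨ (PySem.Str.isIn low.1 "CDEFGAB" = true ∧ PySem.Str.isIn high.1 "CDEFGAB" = true ∧
            ∀ s ∈ l, PySem.Str.isIn s.1 "CDEFGAB" = true)
instance (l : List (String × Int)) (low : String × Int) (high : String × Int) : Decidable (Pre_singable l low high) := by unfold Pre_singable; infer_instance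

def pvWitness_singable : (List (String × Int)) × (String × Int) × (String × Int) :=
  ([("C", 2), ("E", 3)], ("C", 1), ("B", 3))

def Spec_singable (l : List (String × Int)) (low : String × Int) (high : String × Int) (out : Bool) : Prop := out = singable_alt l low high
instance (l : List (String × Int)) (low : String × Int) (high : String × Int) (out : Bool) : Decidable (Spec_singable l low high out) := by unfold Spec_singable; infer_instance

-- ===== CLAIM (what is proved, stated in full; the proofs are below) =====
def Claim_equal_singable : Prop := ∀ (l : List (String × Int)) (low : String × Int) (high : String × Int), Dom_singable l low high → Pre_singable l low high → Spec_singable l low high (singable l low high)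

-- ===== LEMMAS AND PROOFS =====

-- total key function (agrees with pvKey? on pitches found in 'CDEFGAB'); proof helper only
def pvKeyF (s : String × Int) : Int := s.2 * 7 + PySem.Str.find "CDEFGAB" s.1

theorem pvFind_bounds {p : String} (h : PySem.Str.isIn p "CDEFGAB" = true) :
    0 ≤ PySem.Str.find "CDEFGAB" p ∧ PySem.Str.find "CDEFGAB" p ≤ 6 := by
  have hinf : p.toList <:+: ("CDEFGAB" : String).toList := (PySem.Str.isIn_iff_infix _ _).mp h
  rw [PySem.Str.find_eq]
  have h0 : 0 ≤ PySem.Chars.find ("CDEFGAB" : String).toList p.toList :=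
    (PySem.Chars.find_nonneg_iff _ _).mpr hinf
  have h7 : PySem.Chars.find ("CDEFGAB" : String).toList p.toList ≤ 7 := by
    have := PySem.Chars.find_le_length ("CDEFGAB" : String).toList p.toList
    simpa using this
  refine ⟨h0, ?_⟩
  by_contra hgt
  have hcontra : PySem.Chars.find ("CDEFGAB" : String).toList p.toList = 7 := by omega
  have hspec := (PySem.Chars.find_spec (s := ("CDEFGAB" : String).toList) (sub := p.toList) h0).1
  rw [hcontra] at hspec
  have hdrop : (("CDEFGAB" : String).toList.drop (7 : Int).toNat) = [] := by decide
  rw [hdrop] at hspec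
  have hnil : p.toList = [] := List.prefix_nil.mp hspec
  rw [hnil, PySem.Chars.find_nil] at hcontra
  omega

theorem pvIdx_eq {p : String} (h : PySem.Str.isIn p "CDEFGAB" = true) :
    pvIdx p = some (PySem.Str.find "CDEFGAB" p) := by
  have := pvFind_bounds h
  rw [pvIdx]
  exact if_neg (by omega)

theorem pvKey?_eq {s : String × Int} (h : PySem.Str.isIn s.1 "CDEFGAB" = true) :
    pvKey? s = some (pvKeyF s) := by
  rw [pvKey?, pvIdx_eq h, pvKeyF]

-- the 6-branch decision tree equals the key-interval test, given index bounds
theorem chain_eq_key (so lo ho si li hi : Int)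
    (hs : 0 ≤ si ∧ si ≤ 6) (hl : 0 ≤ li ∧ li ≤ 6) (hh : 0 ≤ hi ∧ hi ≤ 6) :
    (if so < ho ∧ so > lo then (1:Int)
     else if so < lo then 0
     else if so > ho then 0
     else if so = ho ∧ ho = lo then (if si ≥ li ∧ si ≤ hi then 1 else 0)
     else if so = ho then (if si ≤ hi then 1 else 0)
     else if so = lo then (if si ≥ li then 1 else 0)
     else 0)
    = (if lo * 7 + li ≤ so * 7 + si ∧ so * 7 + si ≤ ho * 7 + hi then 1 else 0) := by
  split_ifs <;> omega

-- A's compare returns 1 exactly when the song's key is inside [key low, key high]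
theorem compare_eq_key {low high : String × Int} (s : String × Int)
    (hl : PySem.Str.isIn low.1 "CDEFGAB" = true) (hh : PySem.Str.isIn high.1 "CDEFGAB" = true)
    (hs : PySem.Str.isIn s.1 "CDEFGAB" = true) :
    pvCompare s low high =
      some (if pvKeyF low ≤ pvKeyF s ∧ pvKeyF s ≤ pvKeyF high then 1 else 0) := by
  rw [pvCompare, pvIdx_eq hs, pvIdx_eq hl, pvIdx_eq hh]
  simp only []
  rw [chain_eq_key s.2 low.2 high.2 _ _ _ (pvFind_bounds hs) (pvFind_bounds hl) (pvFind_bounds hh)]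
  rfl

-- A's fold produces exactly the list of 0/1 flags for the key-interval test
theorem fold_eq_map {low high : String × Int}
    (hl : PySem.Str.isIn low.1 "CDEFGAB" = true) (hh : PySem.Str.isIn high.1 "CDEFGAB" = true) :
    ∀ (l : List (String × Int)), (∀ s ∈ l, PySem.Str.isIn s.1 "CDEFGAB" = true) →
    ∀ (acc : List Int),
      l.foldl (fun acc i =>
        match acc, pvCompare i low high with
        | some o, some c => some (o ++ [c])
        | _, _ => none) (some acc)
      = some (acc ++ l.map (fun s =>
          if pvKeyF low ≤ pvKeyF s ∧ pvKeyF s ≤ pvKeyF high then (1:Int) else 0)) := by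
  intro l
  induction l with
  | nil => intro _ acc; simp
  | cons x xs ih =>
      intro hmem acc
      have hx := hmem x (by simp)
      simp only [List.foldl_cons, compare_eq_key x hl hh hx]
      rw [ih (fun s hs => hmem s (by simp [hs]))]
      simp

-- B's comprehension succeeds and is the map of the (total on Pre_) key function
theorem mapM_keys (l : List (String × Int))
    (hmem : ∀ s ∈ l, PySem.Str.isIn s.1 "CDEFGAB" = true) :
    l.mapM pvKey? = some (l.map pvKeyF) := by
  induction l with
  | nil => rfl
  | cons x xs ih =>
      rw [List.mapM_cons, pvKey?_eq (hmem x (by simp)), ih (fun s hs => hmem s (by simp [hs]))]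
      rfl

theorem singable_eq (l : List (String × Int)) (low high : String × Int)
    (hl : PySem.Str.isIn low.1 "CDEFGAB" = true) (hh : PySem.Str.isIn high.1 "CDEFGAB" = true)
    (hmem : ∀ s ∈ l, PySem.Str.isIn s.1 "CDEFGAB" = true) :
    singable l low high = singable_alt l low high := by
  rcases eq_or_ne l [] with rfl | hne
  · rfl
  have hksne : l.map pvKeyF ≠ [] := by simpa using hne
  rcases hmn : PySem.List.min? (l.map pvKeyF) (fun x : Int => x) with _ | mn
  · exact absurd ((PySem.List.min?_eq_none_iff _ _).mp hmn) hksne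
  rcases hmx : PySem.List.max? (l.map pvKeyF) (fun x : Int => x) with _ | mx
  · exact absurd ((PySem.List.max?_eq_none_iff _ _).mp hmx) hksne
  have hmnmem : mn ∈ l.map pvKeyF := PySem.List.min?_mem hmn
  have hmxmem : mx ∈ l.map pvKeyF := PySem.List.max?_mem hmx
  have hmnmin : ∀ y ∈ l.map pvKeyF, mn ≤ y := fun y hy => PySem.List.min?_isMin hmn y hy
  have hmxmax : ∀ y ∈ l.map pvKeyF, y ≤ mx := fun y hy => PySem.List.max?_isMax hmx y hy
  rw [singable, singable_alt, if_neg hne, mapM_keys l hmem, pvKey?_eq hl, pvKey?_eq hh]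
  simp only [fold_eq_map hl hh l hmem [], List.nil_append, hmn, hmx]
  by_cases h0 : (0:Int) ∈ l.map (fun s =>
      if pvKeyF low ≤ pvKeyF s ∧ pvKeyF s ≤ pvKeyF high then (1:Int) else 0)
  · rw [if_pos h0]
    obtain ⟨s, hs, hfs⟩ := List.mem_map.mp h0
    have hbad : ¬ (pvKeyF low ≤ pvKeyF s ∧ pvKeyF s ≤ pvKeyF high) := by
      intro hc; rw [if_pos hc] at hfs; exact absurd hfs (by norm_num)
    have hsk : pvKeyF s ∈ l.map pvKeyF := List.mem_map_of_mem hs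
    by_cases hb1 : pvKeyF low ≤ mn
    · by_cases hb2 : mx ≤ pvKeyF high
      · exact absurd ⟨le_trans hb1 (hmnmin _ hsk), le_trans (hmxmax _ hsk) hb2⟩ hbad
      · simp [hb2]
    · simp [hb1]
  · rw [if_neg h0]
    have hall : ∀ y ∈ l, pvKeyF low ≤ pvKeyF y ∧ pvKeyF y ≤ pvKeyF high := by
      intro y hy
      by_contra hc
      exact h0 (List.mem_map.mpr ⟨y, hy, by rw [if_neg hc]⟩)
    obtain ⟨smn, hsmn, rfl⟩ := List.mem_map.mp hmnmem
    obtain ⟨smx, hsmx, rfl⟩ := List.mem_map.mp hmxmem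
    simp [(hall smn hsmn).1, (hall smx hsmx).2]

-- ===== VERDICT (by name: the statement is the Claim_ definition above) =====
theorem singable_spec : Claim_equal_singable := by
  intro l low high _ hpre
  unfold Spec_singable
  rcases hpre with h | ⟨hl, hh, hmem⟩
  · subst h; rfl
  · exact singable_eq l low high hl hh hmem
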